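-- pv_equiv track=rewrite | github.com/cloudera/CAI_STUDIO_AGENT | studio/workflow_engine/src/engine/crewai/manager/state_context.py | insert_after_first_user
-- ===== SOURCE A (Python) =====
-- from typing import Any, Dict, List, Optional
--
-- def insert_after_first_user(messages: List[Dict[str, Any]], assistant_msgs: List[Dict[str, Any]]) -> List[Dict[str, Any]]:
--     if not assistant_msgs:
--         return messages
--     try:
--         first_user_index = next((idx for idx, m in enumerate(messages) if m.get("role") == "user"), None)
--     except Exception:
--         first_user_index = None
--     if first_user_index is None:
--         return messages + assistant_msgs
--     insertion_index = first_user_index + 1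
--     return messages[:insertion_index] + assistant_msgs + messages[insertion_index:]
-- ===== SOURCE B (Python) =====
-- def insert_after_first_user(messages, assistant_msgs):
--     if not assistant_msgs:
--         return messages
--     out = []
--     inserted = False
--     for m in messages:
--         out.append(m)
--         if not inserted and m.get("role") == "user":
--             out.extend(assistant_msgs)
--             inserted = True
--     if not inserted:
--         out.extend(assistant_msgs)
--     return out
-- ===== Notes on version B (the rewrite author's own statement) =====
-- stated objective: alternative
-- what changed: Replaces A's two-phase index search (enumerate/next to find the first user index, then three slice concatenations) with a single accumulator pass that appends each message and splices in assistant_msgs when the first user message is seen, or at the end if none.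
import Mathlib
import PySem

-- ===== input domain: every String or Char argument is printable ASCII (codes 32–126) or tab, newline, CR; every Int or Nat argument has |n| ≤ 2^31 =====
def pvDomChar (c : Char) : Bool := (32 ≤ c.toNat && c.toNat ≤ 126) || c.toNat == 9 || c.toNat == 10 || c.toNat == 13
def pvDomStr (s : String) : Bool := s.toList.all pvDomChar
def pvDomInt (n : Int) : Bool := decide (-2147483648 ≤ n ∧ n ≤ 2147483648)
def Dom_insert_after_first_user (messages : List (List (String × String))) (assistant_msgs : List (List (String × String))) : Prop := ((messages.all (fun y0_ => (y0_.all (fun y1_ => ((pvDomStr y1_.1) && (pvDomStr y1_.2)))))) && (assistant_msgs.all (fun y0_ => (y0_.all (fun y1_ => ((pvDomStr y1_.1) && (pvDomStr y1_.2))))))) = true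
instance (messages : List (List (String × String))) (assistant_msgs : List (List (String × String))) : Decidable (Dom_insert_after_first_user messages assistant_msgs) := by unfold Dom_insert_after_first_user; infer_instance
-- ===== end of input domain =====

-- B replaces A's index-search-then-slice with a single accumulator pass; objective: alternative decomposition, same cost.
-- ===== PORT A =====
-- next((idx for idx, m in enumerate(messages) if m.get("role") == "user"), None)
def firstUserIdx (messages : List (List (String × String))) (idx : Nat) : Option Nat :=
  match messages with
  | [] => none
  | m :: rest =>
    if PySem.Dict.get? (PySem.Dict.mk m) "role" == some "user" then some idx else firstUserIdx rest (idx + 1)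

def insert_after_first_user (messages : List (List (String × String))) (assistant_msgs : List (List (String × String))) : List (List (String × String)) :=
  if assistant_msgs = [] then messages
  else
    match firstUserIdx messages 0 with
    | none => messages ++ assistant_msgs
    | some first_user_index =>
      -- messages[:i+1] / messages[i+1:] with nonnegative i+1: exactly List.take / List.drop
      let insertion_index := first_user_index + 1
      messages.take insertion_index ++ assistant_msgs ++ messages.drop insertion_index

-- ===== PORT B =====
-- one step of B's for-loop: state = (out, inserted)
def altStep (assistant_msgs : List (List (String × String))) (st : List (List (String × String)) × Bool) (m : List (String × String)) : List (List (String × String)) × Bool :=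
  let out := st.1 ++ [m]
  if !st.2 && (PySem.Dict.get? (PySem.Dict.mk m) "role" == some "user") then (out ++ assistant_msgs, true)
  else (out, st.2)

def insert_after_first_user_alt (messages : List (List (String × String))) (assistant_msgs : List (List (String × String))) : List (List (String × String)) :=
  if assistant_msgs = [] then messages
  else
    let st := messages.foldl (altStep assistant_msgs) ([], false)
    if st.2 then st.1 else st.1 ++ assistant_msgs

-- ===== PRECONDITION & SPEC =====
def Spec_insert_after_first_user (messages : List (List (String × String))) (assistant_msgs : List (List (String × String))) (out : List (List (String × String))) : Prop := out = insert_after_first_user_alt messages assistant_msgs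
instance (messages : List (List (String × String))) (assistant_msgs : List (List (String × String))) (out : List (List (String × String))) : Decidable (Spec_insert_after_first_user messages assistant_msgs out) := by unfold Spec_insert_after_first_user; infer_instance

-- ===== CLAIM (what is proved, stated in full; the proofs are below) =====
def Claim_equal_insert_after_first_user : Prop := ∀ (messages : List (List (String × String))) (assistant_msgs : List (List (String × String))), Dom_insert_after_first_user messages assistant_msgs → Spec_insert_after_first_user messages assistant_msgs (insert_after_first_user messages assistant_msgs)

-- ===== LEMMAS AND PROOFS =====

-- after insertion the loop just appends the remaining messages
theorem foldl_altStep_true (asst : List (List (String × String))) (ms : List (List (String × String))) (acc : List (List (String × String))) :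
    ms.foldl (altStep asst) (acc, true) = (acc ++ ms, true) := by
  induction ms generalizing acc with
  | nil => simp
  | cons m rest ih => simp [List.foldl, altStep, ih]

-- gold: index-free description of the result (for proofs only)
def gold (ms asst : List (List (String × String))) : List (List (String × String)) :=
  match ms with
  | [] => asst
  | m :: rest =>
    if PySem.Dict.get? (PySem.Dict.mk m) "role" == some "user" then m :: (asst ++ rest)
    else m :: gold rest asst

theorem firstUserIdx_shift (ms : List (List (String × String))) (n : Nat) :
    firstUserIdx ms (n + 1) = (firstUserIdx ms n).map Nat.succ := by
  induction ms generalizing n with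
  | nil => simp [firstUserIdx]
  | cons m rest ih =>
    simp only [firstUserIdx]
    split <;> simp [ih]

theorem gold_eq_A (ms asst : List (List (String × String))) :
    gold ms asst = match firstUserIdx ms 0 with
      | none => ms ++ asst
      | some i => ms.take (i + 1) ++ asst ++ ms.drop (i + 1) := by
  induction ms with
  | nil => simp [gold, firstUserIdx]
  | cons m rest ih =>
    simp only [gold, firstUserIdx]
    by_cases h : PySem.Dict.get? (PySem.Dict.mk m) "role" == some "user"
    · simp [h]
    · simp only [h, if_neg, Bool.false_eq_true, ite_false, firstUserIdx_shift, ih]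
      cases hf : firstUserIdx rest 0 with
      | none => simp
      | some i => simp [List.take_succ_cons, List.drop_succ_cons]

theorem B_loop (ms asst acc : List (List (String × String))) :
    (let st := ms.foldl (altStep asst) (acc, false)
     if st.2 then st.1 else st.1 ++ asst) = acc ++ gold ms asst := by
  induction ms generalizing acc with
  | nil => simp [gold]
  | cons m rest ih =>
    simp only [List.foldl, gold]
    by_cases h : PySem.Dict.get? (PySem.Dict.mk m) "role" == some "user"
    · simp [altStep, h, foldl_altStep_true]
    · simpa [altStep, h] using ih (acc ++ [m])

-- ===== VERDICT (by name: the statement is the Claim_ definition above) =====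
theorem insert_after_first_user_spec : Claim_equal_insert_after_first_user := by
  intro messages assistant_msgs _
  unfold Spec_insert_after_first_user insert_after_first_user insert_after_first_user_alt
  by_cases ha : assistant_msgs = []
  · simp [ha]
  · simp only [ha, ite_false]
    have hb := B_loop messages assistant_msgs []
    simp only [List.nil_append] at hb
    rw [hb, gold_eq_A]
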